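-- pv_equiv track=rewrite | github.com/LGUN33/pychatbot-gun-jalaguier-f | fonction_question.py | token_question
-- ===== SOURCE A (Python) =====
-- def token_question(phrase):# retourne un tableau clean
--     # retire les majuscules :
--     phrase_min=""
--     for lettre in phrase :
--         if 65<=ord(lettre)<=90 :
--             phrase_min+=chr(ord(lettre)+32)
--         else :
--             phrase_min+=lettre
--     # retire la ponctuation
--     phrase_ponctu=""
--     for lettre in phrase_min :
--         mot=""
--         if 97<=ord(lettre)<=122 :
--             mot+=lettre
--         else :
--             mot+=" "
--         phrase_ponctu+=mot
--     #chaque mot est ajouté dans un tableau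
--     tab_mot=phrase_ponctu.split()
--     return(tab_mot)
-- ===== SOURCE B (Python) =====
-- def token_question(phrase):
--     # single pass: accumulate lowercase-letter runs directly, flush on any other char
--     words = []
--     cur = ""
--     for c in phrase:
--         o = ord(c)
--         if 97 <= o <= 122:
--             cur += c
--         elif 65 <= o <= 90:
--             cur += chr(o + 32)
--         elif cur:
--             words.append(cur)
--             cur = ""
--     if cur:
--         words.append(cur)
--     return words
-- ===== Notes on version B (the rewrite author's own statement) =====
-- stated objective: simpler
-- what changed: Replaces A's two full-string rewriting passes (lowercasing pass, punctuation-to-space pass) followed by split() with a single pass that accumulates lowercase-letter runs directly and emits each word when the run ends.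
import Mathlib
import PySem

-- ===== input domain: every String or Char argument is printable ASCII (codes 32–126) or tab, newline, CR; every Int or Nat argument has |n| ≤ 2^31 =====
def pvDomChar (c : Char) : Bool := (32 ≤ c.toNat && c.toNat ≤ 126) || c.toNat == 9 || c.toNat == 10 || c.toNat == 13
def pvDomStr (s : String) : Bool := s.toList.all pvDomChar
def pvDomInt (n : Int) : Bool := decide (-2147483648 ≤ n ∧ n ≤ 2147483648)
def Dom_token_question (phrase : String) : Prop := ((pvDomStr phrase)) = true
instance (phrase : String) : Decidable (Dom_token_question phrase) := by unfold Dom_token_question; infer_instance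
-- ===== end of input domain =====

-- B replaces A's two whole-string rewriting passes + split() with one pass that
-- accumulates lowercase-letter runs and emits words directly (objective: simpler).

-- ===== PORT A =====
def token_question (phrase : String) : List String :=
  -- retire les majuscules
  let phrase_min : List Char := phrase.toList.foldl (fun acc c =>
    if 65 ≤ c.toNat ∧ c.toNat ≤ 90 then acc ++ [Char.ofNat (c.toNat + 32)] else acc ++ [c]) []
  -- retire la ponctuation
  let phrase_ponctu : List Char := phrase_min.foldl (fun acc c =>
    let mot : List Char := if 97 ≤ c.toNat ∧ c.toNat ≤ 122 then [c] else [' ']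
    acc ++ mot) []
  -- phrase_ponctu.split()
  (PySem.Chars.split₀ phrase_ponctu).map String.ofList

-- ===== PORT B =====
def token_question_alt (phrase : String) : List String :=
  let st := phrase.toList.foldl (fun (st : List String × List Char) c =>
    if 97 ≤ c.toNat ∧ c.toNat ≤ 122 then (st.1, st.2 ++ [c])
    else if 65 ≤ c.toNat ∧ c.toNat ≤ 90 then (st.1, st.2 ++ [Char.ofNat (c.toNat + 32)])
    else if st.2 ≠ [] then (st.1 ++ [String.ofList st.2], [])
    else st) ([], [])
  if st.2 ≠ [] then st.1 ++ [String.ofList st.2] else st.1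

-- ===== PRECONDITION & SPEC =====
def Spec_token_question (phrase : String) (out : List String) : Prop := out = token_question_alt phrase
instance (phrase : String) (out : List String) : Decidable (Spec_token_question phrase out) := by unfold Spec_token_question; infer_instance

-- ===== CLAIM (what is proved, stated in full; the proofs are below) =====
def Claim_equal_token_question : Prop := ∀ (phrase : String), Dom_token_question phrase → Spec_token_question phrase (token_question phrase)

-- ===== LEMMAS AND PROOFS =====

/-- A's per-char normalisation: letters to lowercase, everything else to a space. -/
def pvNorm (c : Char) : Char :=
  if 97 ≤ c.toNat ∧ c.toNat ≤ 122 then c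
  else if 65 ≤ c.toNat ∧ c.toNat ≤ 90 then Char.ofNat (c.toNat + 32)
  else ' '

/-- Forward-accumulator tokenizer on normalised characters. -/
def pvTok : List Char → List Char → List (List Char)
  | [], cur => if cur = [] then [] else [cur]
  | c :: rest, cur =>
      if PySem.Chars.isspace c then
        (if cur = [] then pvTok rest [] else cur :: pvTok rest [])
      else pvTok rest (cur ++ [c])

theorem pvValid_add32 (n : Nat) (h1 : 65 ≤ n) (h2 : n ≤ 90) :
    (Char.ofNat (n + 32)).toNat = n + 32 := by
  rw [Char.toNat_ofNat]
  have : (n + 32).isValidChar := by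
    left; omega
  simp [this]

theorem pvNorm_letter_or_space (c : Char) :
    (97 ≤ (pvNorm c).toNat ∧ (pvNorm c).toNat ≤ 122) ∨ pvNorm c = ' ' := by
  unfold pvNorm
  split_ifs with h1 h2
  · left; exact h1
  · left; rw [pvValid_add32 c.toNat h2.1 h2.2]; omega
  · right; rfl

theorem pvIsspace_letter (c : Char) (h : 97 ≤ c.toNat ∧ c.toNat ≤ 122) :
    PySem.Chars.isspace c = false := by
  simp only [PySem.Chars.isspace]
  simp only [Bool.or_eq_false_iff, Bool.and_eq_false_iff, decide_eq_false_iff_not]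
  omega

theorem go_eq_tok (ds : List Char) : ∀ (cur : List Char) (acc : List (List Char)),
    PySem.Chars.split₀.go ds cur acc = acc.reverse ++ pvTok ds cur.reverse := by
  induction ds with
  | nil =>
      intro cur acc
      simp only [PySem.Chars.split₀.go, pvTok]
      by_cases h : cur = []
      · simp [h]
      · simp [h, List.reverse_eq_nil_iff]
  | cons c rest ih =>
      intro cur acc
      simp only [PySem.Chars.split₀.go, pvTok]
      by_cases hs : PySem.Chars.isspace c
      · by_cases h : cur = []
        · simp [hs, h, ih]
        · simp [hs, h, List.reverse_eq_nil_iff, ih]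
      · simp [hs, ih]

theorem split₀_eq_tok (ds : List Char) : PySem.Chars.split₀ ds = pvTok ds [] := by
  simpa using go_eq_tok ds [] []

/-- B's fold, restated over the normalised characters. -/
def pvG (st : List String × List Char) (d : Char) : List String × List Char :=
  if 97 ≤ d.toNat ∧ d.toNat ≤ 122 then (st.1, st.2 ++ [d])
  else if st.2 ≠ [] then (st.1 ++ [String.ofList st.2], []) else st

theorem pvFold_eq_G (cs : List Char) (st : List String × List Char) :
    cs.foldl (fun (st : List String × List Char) c =>
      if 97 ≤ c.toNat ∧ c.toNat ≤ 122 then (st.1, st.2 ++ [c])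
      else if 65 ≤ c.toNat ∧ c.toNat ≤ 90 then (st.1, st.2 ++ [Char.ofNat (c.toNat + 32)])
      else if st.2 ≠ [] then (st.1 ++ [String.ofList st.2], [])
      else st) st
    = (cs.map pvNorm).foldl pvG st := by
  rw [List.foldl_map]
  apply PySem.List.foldl_congr_mem
  intro acc c _
  unfold pvG pvNorm
  by_cases h1 : 97 ≤ c.toNat ∧ c.toNat ≤ 122
  · simp [h1]
  · by_cases h2 : 65 ≤ c.toNat ∧ c.toNat ≤ 90
    · have hv := pvValid_add32 c.toNat h2.1 h2.2
      simp [h1, h2, hv, show 97 ≤ c.toNat + 32 ∧ c.toNat + 32 ≤ 122 by omega]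
    · simp [h1, h2]

/-- Core invariant: B's fold over letter-or-space chars computes pvTok. -/
theorem pvG_tok (ds : List Char)
    (hd : ∀ d ∈ ds, (97 ≤ d.toNat ∧ d.toNat ≤ 122) ∨ d = ' ') :
    ∀ (words : List String) (cur : List Char),
    (let st := ds.foldl pvG (words, cur)
     if st.2 ≠ [] then st.1 ++ [String.ofList st.2] else st.1)
    = words ++ (pvTok ds cur).map String.ofList := by
  induction ds with
  | nil =>
      intro words cur
      simp only [List.foldl_nil, pvTok]
      by_cases h : cur = [] <;> simp [h]
  | cons d rest ih =>
      intro words cur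
      have hd' : ∀ x ∈ rest, (97 ≤ x.toNat ∧ x.toNat ≤ 122) ∨ x = ' ' := by
        intro x hx; exact hd x (List.mem_cons_of_mem _ hx)
      rcases hd d List.mem_cons_self with hl | hsp
      · have hns := pvIsspace_letter d hl
        simp only [List.foldl_cons, pvTok, hns, pvG, hl, Bool.false_eq_true, if_false]
        exact ih hd' words (cur ++ [d])
      · subst hsp
        have hnl : ¬ (97 ≤ (' ' : Char).toNat ∧ (' ' : Char).toNat ≤ 122) := by decide
        have hs : PySem.Chars.isspace ' ' = true := by decide
        by_cases h : cur = []
        · simp only [List.foldl_cons, pvTok, hs, pvG, hnl, h, if_true, if_false,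
            ne_eq, not_true_eq_false]
          simpa [h] using ih hd' words []
        · simp only [List.foldl_cons, pvTok, hs, pvG, hnl, h, if_false, if_true,
            if_pos (by simpa using h : (cur ≠ []))]
          rw [ih hd' (words ++ [String.ofList cur]) []]
          simp

/-- A's two rewriting passes produce exactly the normalised character list. -/
theorem pvA_passes (phrase : String) :
    token_question phrase = (PySem.Chars.split₀ (phrase.toList.map pvNorm)).map String.ofList := by
  simp only [token_question]
  have h1 : phrase.toList.foldl (fun acc c =>
      if 65 ≤ c.toNat ∧ c.toNat ≤ 90 then acc ++ [Char.ofNat (c.toNat + 32)] else acc ++ [c]) []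
      = phrase.toList.map (fun c => if 65 ≤ c.toNat ∧ c.toNat ≤ 90 then Char.ofNat (c.toNat + 32) else c) := by
    rw [PySem.List.foldl_congr_mem (g := fun acc c =>
      acc ++ [if 65 ≤ c.toNat ∧ c.toNat ≤ 90 then Char.ofNat (c.toNat + 32) else c])]
    · simpa using PySem.List.foldl_append_singleton_eq_map
        (fun c => if 65 ≤ c.toNat ∧ c.toNat ≤ 90 then Char.ofNat (c.toNat + 32) else c)
        phrase.toList []
    · intro acc c _; split_ifs <;> rfl
  rw [h1]
  have h2 : ∀ (l : List Char), l.foldl (fun acc c =>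
      let mot : List Char := if 97 ≤ c.toNat ∧ c.toNat ≤ 122 then [c] else [' ']
      acc ++ mot) []
      = l.map (fun c => if 97 ≤ c.toNat ∧ c.toNat ≤ 122 then c else ' ') := by
    intro l
    rw [PySem.List.foldl_congr_mem (g := fun acc c =>
      acc ++ [if 97 ≤ c.toNat ∧ c.toNat ≤ 122 then c else ' '])]
    · simpa using PySem.List.foldl_append_singleton_eq_map
        (fun c => if 97 ≤ c.toNat ∧ c.toNat ≤ 122 then c else ' ') l []
    · intro acc c _; split_ifs <;> rfl
  rw [h2, List.map_map]
  have hfun : ((fun c => if 97 ≤ c.toNat ∧ c.toNat ≤ 122 then c else ' ') ∘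
      (fun c => if 65 ≤ c.toNat ∧ c.toNat ≤ 90 then Char.ofNat (c.toNat + 32) else c)) = pvNorm := by
    funext c
    unfold pvNorm
    by_cases h1' : 97 ≤ c.toNat ∧ c.toNat ≤ 122
    · simp [h1', Function.comp, show ¬ (65 ≤ c.toNat ∧ c.toNat ≤ 90) by omega]
    · by_cases h2' : 65 ≤ c.toNat ∧ c.toNat ≤ 90
      · have hv := pvValid_add32 c.toNat h2'.1 h2'.2
        simp [h1', h2', Function.comp, hv, show 97 ≤ c.toNat + 32 ∧ c.toNat + 32 ≤ 122 by omega]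
      · simp [h1', h2', Function.comp]
  rw [hfun]

-- ===== VERDICT (by name: the statement is the Claim_ definition above) =====
theorem token_question_spec : Claim_equal_token_question := by
  intro phrase _
  unfold Spec_token_question
  rw [pvA_passes, split₀_eq_tok]
  unfold token_question_alt
  rw [pvFold_eq_G]
  have hd : ∀ d ∈ phrase.toList.map pvNorm, (97 ≤ d.toNat ∧ d.toNat ≤ 122) ∨ d = ' ' := by
    intro d hdm
    rcases List.mem_map.1 hdm with ⟨c, _, rfl⟩
    exact pvNorm_letter_or_space c
  simpa using (pvG_tok (phrase.toList.map pvNorm) hd [] []).symm
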